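-- pv_equiv track=rewrite | github.com/johnmayou/aoc-py | 2015/25.2.py | calc_step
-- ===== SOURCE A (Python) =====
-- def calc_step(row: int, col: int) -> int:
--   step = r = c = 1
--   while r != row or c != col:
--     if r == 1:
--       r = c + 1
--       c = 1
--     else:
--       r -= 1
--       c += 1
--     step += 1
--   return step
-- ===== SOURCE B (Python) =====
-- def calc_step(row: int, col: int) -> int:
--   d = row + col - 1
--   return d * (d - 1) // 2 + col
-- ===== Notes on version B (the rewrite author's own statement) =====
-- stated objective: faster
-- what changed: Replaces the step-by-step diagonal walk with the closed-form triangular-number formula d=row+col-1; d*(d-1)//2+col.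
-- outside the precondition, e.g. on calc_step(0, 1): A does not finish within the time limit, B returns 1
import Mathlib
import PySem

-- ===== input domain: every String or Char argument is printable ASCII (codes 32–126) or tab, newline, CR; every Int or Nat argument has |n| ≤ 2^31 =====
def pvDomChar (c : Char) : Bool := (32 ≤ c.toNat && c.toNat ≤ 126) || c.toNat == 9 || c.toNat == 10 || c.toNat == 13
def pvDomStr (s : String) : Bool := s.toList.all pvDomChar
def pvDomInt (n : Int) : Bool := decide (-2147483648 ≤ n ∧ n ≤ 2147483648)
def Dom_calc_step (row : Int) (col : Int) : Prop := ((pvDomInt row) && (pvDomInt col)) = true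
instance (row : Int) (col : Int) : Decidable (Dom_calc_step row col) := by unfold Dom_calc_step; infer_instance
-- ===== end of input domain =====

-- B replaces A's step-by-step diagonal walk with the O(1) closed-form d=row+col-1; d*(d-1)//2+col.


-- ===== PORT A =====
-- the while loop, made total by a fuel parameter large enough for every terminating run
def calcStepLoop (row col : Int) : Nat → Int → Int → Int → Int
  | fuel, step, r, c =>
    if r = row ∧ c = col then step
    else
      match fuel with
      | 0 => step  -- fuel exhausted: only reachable where the Python loop diverges
      | fuel + 1 =>
        if r = 1 then calcStepLoop row col fuel (step + 1) (c + 1) 1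
        else calcStepLoop row col fuel (step + 1) (r - 1) (c + 1)

def calc_step (row : Int) (col : Int) : Int :=
  calcStepLoop row col ((row + col) * (row + col)).toNat 1 1 1

-- ===== PORT B =====
def calc_step_alt (row : Int) (col : Int) : Int :=
  PySem.Int.floordiv ((row + col - 1) * (row + col - 1 - 1)) 2 + col

-- ===== PRECONDITION & SPEC =====
-- Pre_ excludes exactly the inputs (row < 1 or col < 1) on which A's while loop never terminates.
def Pre_calc_step (row : Int) (col : Int) : Prop := 1 ≤ row ∧ 1 ≤ col
instance (row : Int) (col : Int) : Decidable (Pre_calc_step row col) := by unfold Pre_calc_step; infer_instance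
def pvWitness_calc_step : Int × Int := (3, 4)
def Spec_calc_step (row : Int) (col : Int) (out : Int) : Prop := out = calc_step_alt row col
instance (row : Int) (col : Int) (out : Int) : Decidable (Spec_calc_step row col out) := by unfold Spec_calc_step; infer_instance

-- ===== CLAIM (what is proved, stated in full; the proofs are below) =====
def Claim_equal_calc_step : Prop := ∀ (row : Int) (col : Int), Dom_calc_step row col → Pre_calc_step row col → Spec_calc_step row col (calc_step row col)

-- ===== LEMMAS AND PROOFS =====

-- G r c = 2 * (step number of cell (r,c)); kept doubled to avoid division
def pvG (r c : Int) : Int := (r + c - 1) * (r + c - 2) + 2 * c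

lemma pvG_lt {row col r c : Int} (hr : 1 ≤ r) (hc : 1 ≤ c)
    (hrow : 1 ≤ row) (hcol : 1 ≤ col)
    (hprec : r + c < row + col ∨ (r + c = row + col ∧ c ≤ col))
    (hne : ¬(r = row ∧ c = col)) : pvG r c < pvG row col := by
  unfold pvG
  rcases hprec with h | ⟨hd, hcc⟩
  · nlinarith
  · have : c < col := by
      rcases lt_or_eq_of_le hcc with h | h
      · exact h
      · exact absurd ⟨by omega, h⟩ hne
    nlinarith

lemma calcStepLoop_eq (row col : Int) (hrow : 1 ≤ row) (hcol : 1 ≤ col) :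
    ∀ (fuel : Nat) (r c step : Int), 1 ≤ r → 1 ≤ c →
    (r + c < row + col ∨ (r + c = row + col ∧ c ≤ col)) →
    2 * step = pvG r c →
    pvG row col - pvG r c ≤ 2 * (fuel : Int) →
    2 * calcStepLoop row col fuel step r c = pvG row col := by
  intro fuel
  induction fuel with
  | zero =>
    intro r c step hr hc hprec hstep hfuel
    rw [calcStepLoop]
    by_cases hdone : r = row ∧ c = col
    · simp only [hdone, and_self, if_true]
      rw [hstep, hdone.1, hdone.2]
    · exact absurd (pvG_lt hr hc hrow hcol hprec hdone) (by push_cast at hfuel; omega)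
  | succ n ih =>
    intro r c step hr hc hprec hstep hfuel
    rw [calcStepLoop]
    by_cases hdone : r = row ∧ c = col
    · simp only [hdone, and_self, if_true]
      rw [hstep, hdone.1, hdone.2]
    · have hlt := pvG_lt hr hc hrow hcol hprec hdone
      simp only [hdone, if_false]
      by_cases h1 : r = 1
      · simp only [h1, if_true]
        have hG : pvG (c + 1) 1 = pvG 1 c + 2 := by unfold pvG; ring
        have hGold : 2 * step = pvG 1 c := h1 ▸ hstep
        refine ih (c + 1) 1 (step + 1) (by omega) (by omega) ?_ (by rw [hG]; omega)
          (by rw [hG]; push_cast at hfuel ⊢; rw [h1] at hlt hfuel; omega)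
        -- precedence for the new state (c+1, 1)
        rcases hprec with h | ⟨hd, hcc⟩
        · by_cases h2 : c + 2 < row + col
          · exact Or.inl (by omega)
          · exact Or.inr ⟨by omega, hcol⟩
        · -- same diagonal and c ≤ col: since r = 1 and row ≥ 1, c = col forces done
          exfalso
          have : c = col := by omega
          exact hdone ⟨by omega, this⟩
      · simp only [h1, if_false]
        have hG : pvG (r - 1) (c + 1) = pvG r c + 2 := by unfold pvG; ring
        refine ih (r - 1) (c + 1) (step + 1) (by omega) (by omega) ?_ (by rw [hG]; omega)
          (by rw [hG]; push_cast at hfuel ⊢; omega)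
        rcases hprec with h | ⟨hd, hcc⟩
        · exact Or.inl (by omega)
        · refine Or.inr ⟨by omega, ?_⟩
          rcases lt_or_eq_of_le hcc with h | h
          · omega
          · exact absurd ⟨by omega, h⟩ hdone

lemma calc_step_doubled (row col : Int) (hrow : 1 ≤ row) (hcol : 1 ≤ col) :
    2 * calc_step row col = pvG row col := by
  unfold calc_step
  refine calcStepLoop_eq row col hrow hcol _ 1 1 1 le_rfl le_rfl ?_ (by unfold pvG; ring) ?_
  · by_cases h : row + col = 2
    · exact Or.inr ⟨h.symm, hcol⟩
    · exact Or.inl (by omega)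
  · have h0 : (0:Int) ≤ (row + col) * (row + col) := mul_self_nonneg _
    rw [Int.toNat_of_nonneg h0]
    unfold pvG
    nlinarith

lemma calc_step_alt_doubled (row col : Int) :
    2 * calc_step_alt row col = pvG row col := by
  unfold calc_step_alt pvG
  obtain ⟨k, hk⟩ : Even ((row + col - 1) * (row + col - 1 - 1)) := by
    rcases Int.even_or_odd (row + col - 1) with h | h
    · exact h.mul_right _
    · exact (h.sub_odd odd_one).mul_left _
  rw [hk, PySem.Int.floordiv_eq_ediv_of_pos (by omega)]
  have : k + k = 2 * k := by ring
  rw [this, Int.mul_ediv_cancel_left _ (by omega : (2:Int) ≠ 0)]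
  nlinarith [hk]

-- ===== VERDICT (by name: the statement is the Claim_ definition above) =====
theorem calc_step_spec : Claim_equal_calc_step := by
  intro row col _ hpre
  unfold Spec_calc_step
  have h1 := calc_step_doubled row col hpre.1 hpre.2
  have h2 := calc_step_alt_doubled row col
  omega
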